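-- pv_equiv track=rewrite | github.com/pypi-data/pypi-mirror-176 | packages/darbiadev-utilities/darbiadev_utilities-0.4.0-py3-none-any.whl/darbia/utils/iterables.py | enumerate2
-- ===== SOURCE A (Python) =====
-- from typing import Any, Generator, Iterable
--
-- def enumerate2(
--     iterable: Iterable[Any],
--     start: int = 0,
--     step: int = 1,
-- ) -> Generator[tuple[int, Any], Any, None]:
--     """
--     Yield items from a list with a custom index.
--
--     Yields
--     ------
--     item, index : tuple[Any, int]
--         The next item and the next number per step
--     """
--     for item in iterable:
--         yield start, item
--         start += step
-- ===== SOURCE B (Python) =====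
-- from typing import Any, Generator, Iterable
--
-- def enumerate2(
--     iterable: Iterable[Any],
--     start: int = 0,
--     step: int = 1,
-- ) -> Generator[tuple[int, Any], Any, None]:
--     """Two staged passes: materialize the items, then index them with the
--     closed-form index start + i*step instead of a running accumulator."""
--     items = list(iterable)
--     for i in range(len(items)):
--         yield start + i * step, items[i]
-- ===== Notes on version B (the rewrite author's own statement) =====
-- stated objective: alternative
-- what changed: Replaces the running start += step accumulator over the items with a staged formulation: materialize the items, then loop over range(len(items)) computing each index by the closed form start + i*step and fetching items[i] by position.
import Mathlib
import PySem

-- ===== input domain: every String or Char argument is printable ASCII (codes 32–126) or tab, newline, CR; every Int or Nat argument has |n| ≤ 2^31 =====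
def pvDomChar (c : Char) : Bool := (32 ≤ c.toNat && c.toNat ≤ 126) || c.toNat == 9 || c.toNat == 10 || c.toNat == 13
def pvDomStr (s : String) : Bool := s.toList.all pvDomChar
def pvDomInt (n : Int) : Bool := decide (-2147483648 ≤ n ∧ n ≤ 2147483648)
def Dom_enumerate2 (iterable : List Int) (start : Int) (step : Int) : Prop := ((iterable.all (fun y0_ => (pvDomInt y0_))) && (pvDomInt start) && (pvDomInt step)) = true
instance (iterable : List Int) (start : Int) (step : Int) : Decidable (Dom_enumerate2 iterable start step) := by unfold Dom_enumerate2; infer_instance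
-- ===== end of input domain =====

-- B replaces A's running accumulator with a staged pass: index loop over range(len) with closed-form index start + i*step (alternative decomposition; same return value).


-- ===== PORT A =====
-- for item in iterable: yield (start, item); start += step  — recursion carrying the accumulator
def enumerate2 (iterable : List Int) (start : Int) (step : Int) : List (Int × Int) :=
  match iterable with
  | [] => []
  | item :: rest => (start, item) :: enumerate2 rest (start + step) step

-- ===== PORT B =====
-- items = list(iterable); for i in range(len(items)): yield (start + i*step, items[i])
-- items[i] is always in range here, so it is ported with pyGetD (default never used)
def enumerate2_alt (iterable : List Int) (start : Int) (step : Int) : List (Int × Int) :=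
  (PySem.List.pyRange 0 iterable.length 1).map
    (fun i => (start + i * step, PySem.List.pyGetD iterable i 0))

-- ===== PRECONDITION & SPEC =====
def Spec_enumerate2 (iterable : List Int) (start : Int) (step : Int) (out : List (Int × Int)) : Prop := out = enumerate2_alt iterable start step
instance (iterable : List Int) (start : Int) (step : Int) (out : List (Int × Int)) : Decidable (Spec_enumerate2 iterable start step out) := by unfold Spec_enumerate2; infer_instance

-- ===== CLAIM (what is proved, stated in full; the proofs are below) =====
def Claim_equal_enumerate2 : Prop := ∀ (iterable : List Int) (start : Int) (step : Int), Dom_enumerate2 iterable start step → Spec_enumerate2 iterable start step (enumerate2 iterable start step)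

-- ===== LEMMAS AND PROOFS =====

-- shifting the enumeration origin by one is absorbed into the index map
theorem enumerate_shift (xs : List Int) (s : Int) (f : Int × Int → Int × Int) :
    (PySem.List.enumerate xs (s + 1)).map f
      = (PySem.List.enumerate xs s).map (fun p => f (p.1 + 1, p.2)) := by
  induction xs generalizing s with
  | nil => rfl
  | cons x xs ih =>
      simp only [PySem.List.enumerate_cons, List.map_cons, ih]

-- B's range-indexed pass is the affine map over enumerate
theorem alt_eq_map_enumerate (iterable : List Int) (start step : Int) :
    enumerate2_alt iterable start step
      = (PySem.List.enumerate iterable 0).map (fun p => (start + p.1 * step, p.2)) := by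
  rw [enumerate2_alt, PySem.List.enumerate_eq_map_pyRange iterable 0, List.map_map]
  rfl

theorem alt_cons (x : Int) (xs : List Int) (start step : Int) :
    enumerate2_alt (x :: xs) start step = (start, x) :: enumerate2_alt xs (start + step) step := by
  rw [alt_eq_map_enumerate, alt_eq_map_enumerate]
  have h := enumerate_shift xs 0 (fun p => (start + p.1 * step, p.2))
  norm_num at h
  simp only [PySem.List.enumerate_cons, List.map_cons]
  norm_num
  rw [h]
  apply List.map_congr_left
  intro p _
  dsimp only
  ring_nf

theorem enumerate2_eq_alt (iterable : List Int) (start step : Int) :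
    enumerate2 iterable start step = enumerate2_alt iterable start step := by
  induction iterable generalizing start with
  | nil => rfl
  | cons x xs ih => rw [alt_cons, enumerate2]; exact congrArg _ (ih _)

-- ===== VERDICT (by name: the statement is the Claim_ definition above) =====
theorem enumerate2_spec : Claim_equal_enumerate2 := by
  intro iterable start step _
  exact enumerate2_eq_alt iterable start step
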